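-- pv_equiv track=rewrite | github.com/HALsaves/AoC | 2022/12/12.py | create_graph_reverse
-- ===== SOURCE A (Python) =====
-- def create_graph_reverse(data):
--     """create graph of distances from vertice to vertice"""
--     cols = len(data[0])
--     rows = len(data)
--     elevations = [i for row in data for i in row]
--     num_vertices = cols * rows
--     graph = [[0 for column in range(num_vertices)] for row in range(num_vertices)]
--     for vert in range(len(graph)):
--         # up
--         if vert - cols >= 0:
--             graph[vert][vert - cols] = dist_reverse(elevations[vert], elevations[vert - cols])
--         # down
--         if vert + cols <= len(graph) - 1:
--             graph[vert][vert + cols] = dist_reverse(elevations[vert], elevations[vert + cols])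
--         # left
--         if vert % cols - 1 >= 0:
--             graph[vert][vert - 1] = dist_reverse(elevations[vert], elevations[vert - 1])
--         # right
--         if vert % cols + 1 <= cols - 1:
--             graph[vert][vert + 1] = dist_reverse(elevations[vert], elevations[vert + 1])
--     return elevations, graph
--
-- def dist_reverse(a, b):
--     """distance calc"""
--     if b - a >= -1:
--         return 1
--     return 999999
-- ===== SOURCE B (Python) =====
-- def create_graph_reverse(data):
--     """create graph of distances from vertice to vertice"""
--     cols = len(data[0])
--     elevations = [i for row in data for i in row]
--     num_vertices = cols * len(data)
--     graph = [
--         [dist_reverse(elevations[i], elevations[j])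
--          if abs(i - j) == cols or (abs(i - j) == 1 and i // cols == j // cols)
--          else 0
--          for j in range(num_vertices)]
--         for i in range(num_vertices)]
--     return elevations, graph
--
-- def dist_reverse(a, b):
--     """distance calc"""
--     if b - a >= -1:
--         return 1
--     return 999999
-- ===== Notes on version B (the rewrite author's own statement) =====
-- stated objective: alternative
-- what changed: A builds a zero matrix and scatters four neighbour writes per vertex into it; B decides each cell (i,j) directly with a neighbour predicate (abs(i-j)==cols, or abs(i-j)==1 within the same row i//cols==j//cols) in a nested comprehension, with no mutation.
import Mathlib
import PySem

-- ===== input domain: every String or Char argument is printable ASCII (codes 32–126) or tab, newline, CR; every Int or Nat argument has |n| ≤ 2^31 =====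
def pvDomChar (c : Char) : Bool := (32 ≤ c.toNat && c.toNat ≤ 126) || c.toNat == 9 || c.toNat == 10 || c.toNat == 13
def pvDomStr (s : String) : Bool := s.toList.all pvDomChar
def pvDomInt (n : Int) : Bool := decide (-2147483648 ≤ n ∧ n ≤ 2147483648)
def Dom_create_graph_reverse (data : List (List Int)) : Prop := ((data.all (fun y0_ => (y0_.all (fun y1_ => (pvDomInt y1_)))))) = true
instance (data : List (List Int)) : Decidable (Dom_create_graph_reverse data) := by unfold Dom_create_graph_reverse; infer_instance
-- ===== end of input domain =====

-- B replaces A's per-vertex scatter of four neighbour writes into a mutable zero matrix by a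
-- direct per-cell decision (a neighbour predicate on the index pair) emitted as a nested
-- comprehension; objective: alternative decomposition, same asymptotic cost.

-- ===== PORT A =====
def dist_reverse (a b : Int) : Int := if b - a ≥ -1 then 1 else 999999

-- the four in-place writes 'graph[vert][..] = dist_reverse(..)' of one loop iteration,
-- applied to the mutable row graph[vert] (read once, written back once — same effect)
def pvRowUpd (cols V : Nat) (e : Nat → Int) (vert : Nat) (r : List Int) : List Int :=
  let r1 := if cols ≤ vert then r.set (vert - cols) (dist_reverse (e vert) (e (vert - cols))) else r
  let r2 := if vert + cols < V then r1.set (vert + cols) (dist_reverse (e vert) (e (vert + cols))) else r1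
  let r3 := if 1 ≤ vert % cols then r2.set (vert - 1) (dist_reverse (e vert) (e (vert - 1))) else r2
  if vert % cols + 1 ≤ cols - 1 then r3.set (vert + 1) (dist_reverse (e vert) (e (vert + 1))) else r3

def pvStepA (cols V : Nat) (e : Nat → Int) (g : List (List Int)) (vert : Nat) : List (List Int) :=
  g.set vert (pvRowUpd cols V e vert (g.getD vert []))

def create_graph_reverse (data : List (List Int)) : List Int × List (List Int) :=
  let cols := (data.headD []).length        -- len(data[0]); Pre_ guarantees data ≠ []
  let rows := data.length
  let elevations := data.flatten
  let numVertices := cols * rows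
  let e := fun i => elevations.getD i 0     -- elevations[i]; in range on every input Pre_ admits
  let graph0 := List.replicate numVertices (List.replicate numVertices (0 : Int))
  let graph := (List.range numVertices).foldl (pvStepA cols numVertices e) graph0
  (elevations, graph)

-- ===== PORT B =====
def dist_reverse_alt (a b : Int) : Int := if b - a ≥ -1 then 1 else 999999

-- abs(i-j)==cols (vertical) or abs(i-j)==1 and same row (horizontal, no wrap-around)
def pvNbr (cols i j : Nat) : Bool :=
  (((i : Int) - (j : Int)).natAbs = cols) ||
  ((((i : Int) - (j : Int)).natAbs = 1) && (i / cols = j / cols))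

def create_graph_reverse_alt (data : List (List Int)) : List Int × List (List Int) :=
  let cols := (data.headD []).length
  let elevations := data.flatten
  let numVertices := cols * data.length
  let e := fun i => elevations.getD i 0     -- elevations[i]; in range on every input Pre_ admits
  let graph := (List.range numVertices).map (fun i =>
    (List.range numVertices).map (fun j =>
      if pvNbr cols i j then dist_reverse_alt (e i) (e j) else (0 : Int)))
  (elevations, graph)

-- ===== PRECONDITION & SPEC =====
-- Pre_ excludes exactly the inputs where Python A raises IndexError: empty data (data[0])
-- or a ragged grid whose flattened length is below cols*rows (elevations[i] out of range).
def Pre_create_graph_reverse (data : List (List Int)) : Prop :=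
  data ≠ [] ∧ (data.headD []).length * data.length ≤ data.flatten.length

instance (data : List (List Int)) : Decidable (Pre_create_graph_reverse data) := by
  unfold Pre_create_graph_reverse; infer_instance

def pvWitness_create_graph_reverse : List (List Int) := [[1, 2], [3, 4]]

def Spec_create_graph_reverse (data : List (List Int)) (out : List Int × List (List Int)) : Prop := out = create_graph_reverse_alt data
instance (data : List (List Int)) (out : List Int × List (List Int)) : Decidable (Spec_create_graph_reverse data out) := by unfold Spec_create_graph_reverse; infer_instance

-- ===== CLAIM (what is proved, stated in full; the proofs are below) =====
def Claim_equal_create_graph_reverse : Prop := ∀ (data : List (List Int)), Dom_create_graph_reverse data → Pre_create_graph_reverse data → Spec_create_graph_reverse data (create_graph_reverse data)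

-- ===== LEMMAS AND PROOFS =====

theorem pvRowUpd_length (cols V : Nat) (e : Nat → Int) (i : Nat) (r : List Int) :
    (pvRowUpd cols V e i r).length = r.length := by
  unfold pvRowUpd; split_ifs <;> simp

-- A's final row for vertex i: the four conditional writes applied to a zero row
def pvRowA (cols V : Nat) (e : Nat → Int) (i : Nat) : List Int :=
  pvRowUpd cols V e i (List.replicate V 0)

-- the scatter fold fills one row per iteration: after n steps rows 0..n-1 are final
theorem foldl_stepA (cols V : Nat) (e : Nat → Int) (n : Nat) (hn : n ≤ V) :
    (List.range n).foldl (pvStepA cols V e) (List.replicate V (List.replicate V 0)) =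
      (List.range V).map (fun i => if i < n then pvRowA cols V e i else List.replicate V 0) := by
  induction n with
  | zero =>
      apply List.ext_getElem <;> simp
  | succ n ih =>
      have hn' : n ≤ V := Nat.le_of_succ_le hn
      rw [List.range_succ, List.foldl_append, ih hn']
      simp only [List.foldl_cons, List.foldl_nil]
      have hrow : ((List.range V).map
          (fun i => if i < n then pvRowA cols V e i else List.replicate V 0)).getD n [] =
          List.replicate V (0 : Int) := by
        rw [List.getD_eq_getElem?_getD, List.getElem?_eq_getElem (by simpa using hn)]
        simp
      unfold pvStepA
      rw [hrow]
      apply List.ext_getElem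
      · simp
      · intro k h1 h2
        have hk : k < V := by simpa using h2
        rw [List.getElem_set]
        by_cases hnk : n = k
        · subst hnk
          simp [pvRowA]
        · simp only [List.getElem_map, List.getElem_range]
          by_cases hkn : k < n
          · simp [hnk, hkn, Nat.lt_succ_of_lt hkn]
          · have hkn' : ¬ k < n + 1 := by omega
            simp [hnk, hkn, hkn']

theorem div_succ_iff (cols i : Nat) (h : 0 < cols) :
    (i + 1) / cols = i / cols ↔ i % cols + 1 ≤ cols - 1 := by
  have hd := Nat.div_add_mod i cols
  have hm := Nat.mod_lt i h
  constructor
  · intro he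
    by_contra hc
    have e1 : i + 1 = cols * (i / cols + 1) := by
      have e2 : cols * (i / cols + 1) = cols * (i / cols) + cols := by ring
      omega
    rw [e1, Nat.mul_div_cancel_left _ h] at he
    omega
  · intro hr
    have hlt : i % cols + 1 < cols := by omega
    have e1 : i + 1 = cols * (i / cols) + (i % cols + 1) := by omega
    rw [e1, Nat.mul_add_div h, Nat.div_eq_of_lt hlt]
    omega

theorem div_pred_iff (cols i : Nat) (h : 0 < cols) :
    (i / cols = (i - 1) / cols ∧ 1 ≤ i) ↔ 1 ≤ i % cols := by
  have hd := Nat.div_add_mod i cols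
  have hm := Nat.mod_lt i h
  constructor
  · rintro ⟨he, hi⟩
    by_contra hc
    have hr : i % cols = 0 := by omega
    have hq : 1 ≤ i / cols := by
      rcases Nat.eq_zero_or_pos (i / cols) with h0 | h0
      · rw [h0, Nat.mul_zero] at hd; omega
      · exact h0
    have e2 : cols * (i / cols - 1) + cols = cols * (i / cols) := by
      have e3 : i / cols - 1 + 1 = i / cols := by omega
      calc cols * (i / cols - 1) + cols = cols * (i / cols - 1 + 1) := by ring
        _ = cols * (i / cols) := by rw [e3]
    have hlt : cols - 1 < cols := by omega
    have e1 : i - 1 = cols * (i / cols - 1) + (cols - 1) := by omega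
    rw [e1, Nat.mul_add_div h, Nat.div_eq_of_lt hlt] at he
    omega
  · intro hr
    have hi : 1 ≤ i := by omega
    refine ⟨?_, hi⟩
    have hlt : i % cols - 1 < cols := by omega
    have e1 : i - 1 = cols * (i / cols) + (i % cols - 1) := by omega
    rw [e1, Nat.mul_add_div h, Nat.div_eq_of_lt hlt]
    omega

-- B's neighbour predicate, characterised by A's four guard conditions
theorem pvNbr_iff (cols i j : Nat) (h : 0 < cols) :
    pvNbr cols i j = true ↔
      (j + cols = i ∨ i + cols = j ∨ (j + 1 = i ∧ 1 ≤ i % cols) ∨ (i + 1 = j ∧ i % cols + 1 ≤ cols - 1)) := by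
  unfold pvNbr
  simp only [Bool.or_eq_true, Bool.and_eq_true, decide_eq_true_eq]
  constructor
  · rintro (habs | ⟨habs1, hdiv⟩)
    · omega
    · have hor : i + 1 = j ∨ j + 1 = i := by omega
      rcases hor with hor | hor
      · right; right; right
        refine ⟨hor, (div_succ_iff cols i h).mp ?_⟩
        rw [hor]; exact hdiv.symm
      · right; right; left
        refine ⟨hor, (div_pred_iff cols i h).mp ⟨?_, by omega⟩⟩
        have hj : j = i - 1 := by omega
        rw [← hj]; exact hdiv
  · rintro (hv | hv | ⟨hh, hm⟩ | ⟨hh, hm⟩)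
    · left; omega
    · left; omega
    · right
      refine ⟨by omega, ?_⟩
      have := ((div_pred_iff cols i h).mpr hm).1
      have hj : j = i - 1 := by omega
      rw [hj]; exact this
    · right
      refine ⟨by omega, ?_⟩
      have := (div_succ_iff cols i h).mpr hm
      rw [← hh]; exact this.symm

theorem getD_set (l : List Int) (m j : Nat) (v : Int) :
    (l.set m v).getD j 0 = if m = j ∧ j < l.length then v else l.getD j 0 := by
  rcases Nat.lt_or_ge j l.length with hj | hj
  · rw [List.getD_eq_getElem _ _ (by simpa using hj), List.getElem_set]
    by_cases hm : m = j
    · simp [hm, hj]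
    · simp [hm, hj]
  · rw [List.getD_eq_default _ _ (by simpa using hj), List.getD_eq_default _ _ hj]
    simp; omega

-- the entry at column j of A's row i, as a chain of guards (last write wins)
theorem rowUpd_getD (cols V : Nat) (e : Nat → Int) (i j : Nat) (hj : j < V) :
    (pvRowUpd cols V e i (List.replicate V 0)).getD j 0 =
      if i % cols + 1 ≤ cols - 1 ∧ i + 1 = j then dist_reverse (e i) (e (i + 1))
      else if 1 ≤ i % cols ∧ i - 1 = j then dist_reverse (e i) (e (i - 1))
      else if i + cols < V ∧ i + cols = j then dist_reverse (e i) (e (i + cols))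
      else if cols ≤ i ∧ i - cols = j then dist_reverse (e i) (e (i - cols))
      else 0 := by
  unfold pvRowUpd
  split_ifs with c1 c2 c3 c4 <;>
    simp only [getD_set, List.length_set, List.length_replicate, List.getD_replicate,
      hj, and_true] <;>
    (try split_ifs) <;> first | rfl | (exfalso; omega)

-- A's row i equals B's per-cell decision row
theorem rowA_eq_cell (cols V : Nat) (e : Nat → Int) (i : Nat) (hc : 0 < cols) :
    pvRowA cols V e i =
      (List.range V).map (fun j => if pvNbr cols i j then dist_reverse_alt (e i) (e j) else 0) := by
  unfold pvRowA
  apply List.ext_getElem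
  · simp [pvRowUpd_length]
  · intro j h1 h2
    have hj : j < V := by simpa [pvRowUpd_length] using h1
    rw [← List.getD_eq_getElem _ 0 h1, rowUpd_getD cols V e i j hj]
    simp only [List.getElem_map, List.getElem_range]
    have hrw : (if pvNbr cols i j then dist_reverse_alt (e i) (e j) else 0) =
        (if (j + cols = i ∨ i + cols = j ∨ (j + 1 = i ∧ 1 ≤ i % cols) ∨
            (i + 1 = j ∧ i % cols + 1 ≤ cols - 1)) then dist_reverse_alt (e i) (e j) else 0) := by
      by_cases hn : pvNbr cols i j = true
      · rw [if_pos hn, if_pos ((pvNbr_iff cols i j hc).mp hn)]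
      · rw [if_neg (by simpa using hn), if_neg (fun hp => hn ((pvNbr_iff cols i j hc).mpr hp))]
    rw [hrw]
    have hm := Nat.mod_lt i hc
    have hd := Nat.div_add_mod i cols
    split_ifs <;>
      first
      | rfl
      | (exfalso; omega)
      | (rw [show i + 1 = j from by omega]; rfl)
      | (rw [show i - 1 = j from by omega]; rfl)
      | (rw [show i + cols = j from by omega]; rfl)
      | (rw [show i - cols = j from by omega]; rfl)

-- ===== VERDICT (by name: the statement is the Claim_ definition above) =====
theorem create_graph_reverse_spec : Claim_equal_create_graph_reverse := by
  intro data _ _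
  unfold Spec_create_graph_reverse create_graph_reverse create_graph_reverse_alt
  simp only []
  refine Prod.ext rfl ?_
  rw [foldl_stepA _ _ _ _ (Nat.le_refl _)]
  apply List.map_congr_left
  intro i hi
  have hiV : i < (data.headD []).length * data.length := List.mem_range.mp hi
  have hc : 0 < (data.headD []).length := by
    rcases Nat.eq_zero_or_pos (data.headD []).length with h0 | h0
    · rw [h0] at hiV; simp at hiV
    · exact h0
  rw [if_pos hiV, rowA_eq_cell _ _ _ _ hc]
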